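-- pv_equiv track=rewrite | github.com/jahirulislammolla/CodeFights | Fights/cellsJoining.py | cellsJoining
-- ===== SOURCE A (Python) =====
-- def cellsJoining(table, coords):
--     table = [list(i) for i in table]
--
--     cols = [i for i, v in enumerate(table[0]) if v == '+']
--     rows = [i for i, v in enumerate(table) if v[0] == '+']
--
--     (maxRow, minCol), (minRow, maxCol) = coords
--
--     R = rows[minRow:maxRow + 2]
--     C = cols[minCol:maxCol + 2]
--
--     for row in R:
--         if row in (0, rows[-1]):
--             for col in C[1:-1]:
--                 table[row][col] = '-'
--         elif row in R[1:-1]: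
--             for col in range(C[0] + 1, C[-1]):
--                 table[row][col] = ' '
--
--     for col in C:
--         if col in (0, cols[-1]):
--             for row in R[1:-1]:
--                 table[row][col] = '|'
--         elif col in C[1:-1]:
--             for row in range(R[0] + 1, R[-1]):
--                 table[row][col] = ' '
--
--     table = [''.join(i) for i in table]
--     return table
-- ===== SOURCE B (Python) =====
-- def cellsJoining(table, coords):
--     (maxRow, minCol), (minRow, maxCol) = coords
--
--     cols = [i for i, v in enumerate(table[0]) if v == '+']
--     rows = [i for i, v in enumerate(table) if v[0] == '+']
--
--     R = rows[minRow:maxRow + 2]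
--     C = cols[minCol:maxCol + 2]
--     Rset, Cset = set(R), set(C)
--     Rin, Cin = set(R[1:-1]), set(C[1:-1])
--
--     def ch(r, c, orig):
--         if c in Cset and (c == 0 or c == cols[-1]) and r in Rin:
--             return '|'
--         if c in Cin and R[0] < r < R[-1]:
--             return ' '
--         if r in Rset and (r == 0 or r == rows[-1]) and c in Cin:
--             return '-'
--         if r in Rin and C[0] < c < C[-1]:
--             return ' '
--         return orig
--
--     return [''.join(ch(r, c, orig) for c, orig in enumerate(line))
--             for r, line in enumerate(table)]
-- ===== Notes on version B (the rewrite author's own statement) =====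
-- stated objective: alternative
-- what changed: Replaces A's two passes of in-place mutation loops over the selected '+' row/column lists with a single pointwise rebuild that classifies every cell ('|', ' ', '-', or unchanged) from its coordinates.
import Mathlib
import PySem

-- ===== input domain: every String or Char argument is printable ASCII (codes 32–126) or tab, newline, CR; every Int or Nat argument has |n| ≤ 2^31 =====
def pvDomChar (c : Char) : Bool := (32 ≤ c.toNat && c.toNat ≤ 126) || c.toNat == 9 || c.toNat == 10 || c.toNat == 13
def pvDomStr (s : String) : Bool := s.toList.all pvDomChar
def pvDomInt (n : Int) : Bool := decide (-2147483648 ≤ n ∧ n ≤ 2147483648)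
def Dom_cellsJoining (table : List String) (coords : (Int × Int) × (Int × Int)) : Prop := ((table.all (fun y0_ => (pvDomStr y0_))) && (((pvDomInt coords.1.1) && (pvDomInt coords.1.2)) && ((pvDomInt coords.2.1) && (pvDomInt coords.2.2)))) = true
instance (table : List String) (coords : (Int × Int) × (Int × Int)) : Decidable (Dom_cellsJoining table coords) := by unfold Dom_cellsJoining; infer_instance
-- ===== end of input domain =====

-- B rebuilds the table pointwise by classifying each cell from its coordinates instead of
-- A's two passes of in-place writes; same cost, different decomposition ("alternative").

-- ===== PORT A =====
-- table[row][col] = ch ; exact for the nonnegative in-range indices Pre_ guarantees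
-- (Python would wrap a negative index / raise out of range; no such index occurs under Pre_).
def pvWr (g : List (List Char)) (r c : Int) (ch : Char) : List (List Char) :=
  g.modify r.toNat (fun row => row.set c.toNat ch)

-- cols = [i for i, v in enumerate(table[0]) if v == '+']
def pvColsA (g0 : List Char) : List Int :=
  (PySem.List.enumerate g0 0).filterMap (fun p => if p.2 = '+' then some p.1 else none)

-- rows = [i for i, v in enumerate(table) if v[0] == '+'] ; v[0] raises on an empty row,
-- excluded by Pre_ (headD ' ' is exact for nonempty v).
def pvRowsA (g : List (List Char)) : List Int :=
  (PySem.List.enumerate g 0).filterMap (fun p => if p.2.headD ' ' = '+' then some p.1 else none)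

-- first for-loop of A; rows[-1], C[0], C[-1] via pyGetD (defaults unreachable under Pre_)
def pvPass1 (rows C R : List Int) (g : List (List Char)) : List (List Char) :=
  R.foldl (fun g row =>
    if row = 0 ∨ row = PySem.List.pyGetD rows (-1) 0 then
      (PySem.List.slice C (some 1) (some (-1))).foldl (fun g col => pvWr g row col '-') g
    else if row ∈ PySem.List.slice R (some 1) (some (-1)) then
      (PySem.List.pyRange (PySem.List.pyGetD C 0 0 + 1) (PySem.List.pyGetD C (-1) 0) 1).foldl
        (fun g col => pvWr g row col ' ') g
    else g) g

-- second for-loop of A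
def pvPass2 (cols R C : List Int) (g : List (List Char)) : List (List Char) :=
  C.foldl (fun g col =>
    if col = 0 ∨ col = PySem.List.pyGetD cols (-1) 0 then
      (PySem.List.slice R (some 1) (some (-1))).foldl (fun g row => pvWr g row col '|') g
    else if col ∈ PySem.List.slice C (some 1) (some (-1)) then
      (PySem.List.pyRange (PySem.List.pyGetD R 0 0 + 1) (PySem.List.pyGetD R (-1) 0) 1).foldl
        (fun g row => pvWr g row col ' ') g
    else g) g

def cellsJoining (table : List String) (coords : (Int × Int) × (Int × Int)) : List String :=
  match coords with
  | ((maxRow, minCol), (minRow, maxCol)) =>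
    let g := table.map (fun s => s.toList)          -- table = [list(i) for i in table]
    let cols := pvColsA (g.headD [])                -- table[0] raises on []; Pre_ excludes it
    let rows := pvRowsA g
    let R := PySem.List.slice rows (some minRow) (some (maxRow + 2))
    let C := PySem.List.slice cols (some minCol) (some (maxCol + 2))
    (pvPass2 cols R C (pvPass1 rows C R g)).map (fun l => String.ofList l)  -- ''.join

-- ===== PORT B =====
def pvColsB (table : List String) : List Int :=
  (PySem.List.enumerate (table.headD "").toList 0).filterMap
    (fun p => if p.2 = '+' then some p.1 else none)

def pvRowsB (table : List String) : List Int :=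
  (PySem.List.enumerate table 0).filterMap
    (fun p => if p.2.toList.headD ' ' = '+' then some p.1 else none)

-- the cell classifier ch(r, c, orig) of B (defaults of pyGetD unreachable under Pre_)
def pvClassify (rows cols R C Rset Cset Rin Cin : List Int) (r c : Int) (o : Char) : Char :=
  if c ∈ Cset ∧ (c = 0 ∨ c = PySem.List.pyGetD cols (-1) 0) ∧ r ∈ Rin then '|'
  else if c ∈ Cin ∧ (PySem.List.pyGetD R 0 0 < r ∧ r < PySem.List.pyGetD R (-1) 0) then ' '
  else if r ∈ Rset ∧ (r = 0 ∨ r = PySem.List.pyGetD rows (-1) 0) ∧ c ∈ Cin then '-'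
  else if r ∈ Rin ∧ (PySem.List.pyGetD C 0 0 < c ∧ c < PySem.List.pyGetD C (-1) 0) then ' '
  else o

def cellsJoining_alt (table : List String) (coords : (Int × Int) × (Int × Int)) : List String :=
  match coords with
  | ((maxRow, minCol), (minRow, maxCol)) =>
    let cols := pvColsB table
    let rows := pvRowsB table
    let R := PySem.List.slice rows (some minRow) (some (maxRow + 2))
    let C := PySem.List.slice cols (some minCol) (some (maxCol + 2))
    let Rset := PySem.Set.ofList R
    let Cset := PySem.Set.ofList C
    let Rin := PySem.Set.ofList (PySem.List.slice R (some 1) (some (-1)))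
    let Cin := PySem.Set.ofList (PySem.List.slice C (some 1) (some (-1)))
    (PySem.List.enumerate table 0).map (fun rp =>
      String.ofList ((PySem.List.enumerate rp.2.toList 0).map (fun cp =>
        pvClassify rows cols R C Rset Cset Rin Cin rp.1 cp.1 cp.2)))

-- ===== PRECONDITION & SPEC =====
-- Pre_ excludes exactly the inputs where A raises (empty table, an empty row, a selected
-- region whose clearing loops index an empty '+'-column/row list) and, additionally, when a
-- merge region exists, ragged tables with a row shorter than row 0, where A's writes can
-- raise IndexError depending on the '+' layout (on such tables that still return, A leaves
-- them unchanged and so does B).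
def Pre_cellsJoining (table : List String) (coords : (Int × Int) × (Int × Int)) : Prop :=
  table ≠ [] ∧ (∀ s ∈ table, s.toList ≠ []) ∧
  (let cols : List Int := (PySem.List.enumerate (table.headD "").toList 0).filterMap
     (fun p => if p.2 = '+' then some p.1 else none)
   let rows : List Int := (PySem.List.enumerate table 0).filterMap
     (fun p => if p.2.toList.headD ' ' = '+' then some p.1 else none)
   let R := PySem.List.slice rows (some coords.2.1) (some (coords.1.1 + 2))
   let C := PySem.List.slice cols (some coords.1.2) (some (coords.2.2 + 2))
   (3 ≤ R.length → C ≠ []) ∧ (3 ≤ C.length → R ≠ []) ∧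
   (R ≠ [] → C ≠ [] → ∀ s ∈ table, (table.headD "").toList.length ≤ s.toList.length))
instance (table : List String) (coords : (Int × Int) × (Int × Int)) : Decidable (Pre_cellsJoining table coords) := by
  unfold Pre_cellsJoining; infer_instance

def pvWitness_cellsJoining : List String × ((Int × Int) × (Int × Int)) :=
  (["+-+", "| |", "+-+"], ((0, 0), (0, 0)))

def Spec_cellsJoining (table : List String) (coords : (Int × Int) × (Int × Int)) (out : List String) : Prop := out = cellsJoining_alt table coords
instance (table : List String) (coords : (Int × Int) × (Int × Int)) (out : List String) : Decidable (Spec_cellsJoining table coords out) := by unfold Spec_cellsJoining; infer_instance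

-- ===== CLAIM (what is proved, stated in full; the proofs are below) =====
def Claim_equal_cellsJoining : Prop := ∀ (table : List String) (coords : (Int × Int) × (Int × Int)), Dom_cellsJoining table coords → Pre_cellsJoining table coords → Spec_cellsJoining table coords (cellsJoining table coords)

-- ===== LEMMAS AND PROOFS =====
-- proof-side accessor: the character of cell (r, c)
def gget (g : List (List Char)) (r c : Nat) : Char := (g.getD r []).getD c ' '

theorem length_pvWr (g : List (List Char)) (r c : Int) (ch : Char) :
    (pvWr g r c ch).length = g.length := by
  simp [pvWr]

theorem rowlen_pvWr (g : List (List Char)) (r c : Int) (ch : Char) (i : Nat) :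
    ((pvWr g r c ch).getD i []).length = (g.getD i []).length := by
  simp only [pvWr, List.getD_eq_getElem?_getD, List.getElem?_modify]
  rcases h : g[i]? with _ | row <;> simp_all [Option.map]
  split <;> simp

theorem gget_pvWr (g : List (List Char)) (r c : Int) (ch : Char) (r' c' : Nat)
    (h0r : 0 ≤ r) (h0c : 0 ≤ c)
    (hr : r' < g.length) (hc : c' < (g.getD r' []).length) :
    gget (pvWr g r c ch) r' c' = if r = (r' : Int) ∧ c = (c' : Int) then ch else gget g r' c' := by
  simp only [gget, pvWr, List.getD_eq_getElem?_getD, List.getElem?_modify]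
  rcases h : g[r']? with _ | row
  · simp at h; omega
  · have hrow : g.getD r' [] = row := by simp [List.getD_eq_getElem?_getD, h]
    simp only [Option.getD]
    by_cases hR : r.toNat = r'
    · have hr'' : r = (r' : Int) := by omega
      simp only [hR]
      by_cases hC : c.toNat = c'
      · have hc'' : c = (c' : Int) := by omega
        have : c' < row.length := by rw [hrow] at hc; omega
        simp [this, hr'', hc'']
      · have hc'' : ¬ (c = (c' : Int)) := by omega
        simp [hC, hc'', hr'']
    · have hr'' : ¬ (r = (r' : Int)) := by omega
      simp [hR, hr'']

theorem length_wrRow (S : List Int) (row : Int) (ch : Char) (g : List (List Char)) :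
    (S.foldl (fun g col => pvWr g row col ch) g).length = g.length := by
  induction S generalizing g with
  | nil => rfl
  | cons x S ih => simp only [List.foldl_cons]; rw [ih, length_pvWr]

theorem rowlen_wrRow (S : List Int) (row : Int) (ch : Char) (g : List (List Char)) (i : Nat) :
    ((S.foldl (fun g col => pvWr g row col ch) g).getD i []).length = (g.getD i []).length := by
  induction S generalizing g with
  | nil => rfl
  | cons x S ih => simp only [List.foldl_cons]; rw [ih, rowlen_pvWr]

theorem length_wrCol (S : List Int) (col : Int) (ch : Char) (g : List (List Char)) :
    (S.foldl (fun g row => pvWr g row col ch) g).length = g.length := by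
  induction S generalizing g with
  | nil => rfl
  | cons x S ih => simp only [List.foldl_cons]; rw [ih, length_pvWr]

theorem rowlen_wrCol (S : List Int) (col : Int) (ch : Char) (g : List (List Char)) (i : Nat) :
    ((S.foldl (fun g row => pvWr g row col ch) g).getD i []).length = (g.getD i []).length := by
  induction S generalizing g with
  | nil => rfl
  | cons x S ih => simp only [List.foldl_cons]; rw [ih, rowlen_pvWr]

theorem gget_wrRow (S : List Int) (row : Int) (ch : Char) (g : List (List Char)) (r' c' : Nat)
    (h0 : 0 ≤ row) (hS : ∀ x ∈ S, 0 ≤ x)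
    (hr : r' < g.length) (hc : c' < (g.getD r' []).length) :
    gget (S.foldl (fun g col => pvWr g row col ch) g) r' c'
      = if row = (r' : Int) ∧ (c' : Int) ∈ S then ch else gget g r' c' := by
  induction S generalizing g with
  | nil => simp
  | cons x S ih =>
    simp only [List.foldl_cons]
    rw [ih (pvWr g row x ch) (fun y hy => hS y (List.mem_cons_of_mem _ hy))
        (by rw [length_pvWr]; exact hr) (by rw [rowlen_pvWr]; exact hc),
      gget_pvWr g row x ch r' c' h0 (hS x (List.mem_cons_self)) hr hc]
    by_cases h1 : row = (r' : Int) <;> by_cases h2 : (c' : Int) ∈ S <;>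
      by_cases h3 : x = (c' : Int) <;> simp_all <;> omega

theorem gget_wrCol (S : List Int) (col : Int) (ch : Char) (g : List (List Char)) (r' c' : Nat)
    (h0 : 0 ≤ col) (hS : ∀ x ∈ S, 0 ≤ x)
    (hr : r' < g.length) (hc : c' < (g.getD r' []).length) :
    gget (S.foldl (fun g row => pvWr g row col ch) g) r' c'
      = if col = (c' : Int) ∧ (r' : Int) ∈ S then ch else gget g r' c' := by
  induction S generalizing g with
  | nil => simp
  | cons x S ih =>
    simp only [List.foldl_cons]
    rw [ih (pvWr g x col ch) (fun y hy => hS y (List.mem_cons_of_mem _ hy))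
        (by rw [length_pvWr]; exact hr) (by rw [rowlen_pvWr]; exact hc),
      gget_pvWr g x col ch r' c' (hS x (List.mem_cons_self)) h0 hr hc]
    by_cases h1 : col = (c' : Int) <;> by_cases h2 : (r' : Int) ∈ S <;>
      by_cases h3 : x = (r' : Int) <;> simp_all <;> omega

theorem nonneg_slice_tail (C : List Int) (hC : ∀ x ∈ C, 0 ≤ x) :
    ∀ x ∈ PySem.List.slice C (some 1) (some (-1)), 0 ≤ x :=
  fun x hx => hC x (PySem.List.mem_of_mem_slice C (some 1) (some (-1)) hx)

theorem nonneg_range (C : List Int) (hC : ∀ x ∈ C, 0 ≤ x) :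
    ∀ x ∈ PySem.List.pyRange (PySem.List.pyGetD C 0 0 + 1) (PySem.List.pyGetD C (-1) 0) 1, 0 ≤ x := by
  intro x hx
  rw [PySem.List.mem_pyRange_one] at hx
  rcases C with _ | ⟨c0, C'⟩
  · have h1 : PySem.List.pyGetD ([] : List Int) 0 0 = 0 := by decide
    have h2 : PySem.List.pyGetD ([] : List Int) (-1) 0 = 0 := by decide
    rw [h1, h2] at hx; omega
  · have := hC c0 (List.mem_cons_self)
    rw [PySem.List.pyGetD_zero_cons] at hx
    omega

def body1 (rows C R : List Int) (row : Int) (g : List (List Char)) : List (List Char) :=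
  if row = 0 ∨ row = PySem.List.pyGetD rows (-1) 0 then
    (PySem.List.slice C (some 1) (some (-1))).foldl (fun g col => pvWr g row col '-') g
  else if row ∈ PySem.List.slice R (some 1) (some (-1)) then
    (PySem.List.pyRange (PySem.List.pyGetD C 0 0 + 1) (PySem.List.pyGetD C (-1) 0) 1).foldl
      (fun g col => pvWr g row col ' ') g
  else g

def phi1 (rows C : List Int) (Rin : List Int) (r c : Int) (o : Char) : Char :=
  if r = 0 ∨ r = PySem.List.pyGetD rows (-1) 0 then
    (if c ∈ PySem.List.slice C (some 1) (some (-1)) then '-' else o)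
  else if r ∈ Rin then
    (if c ∈ PySem.List.pyRange (PySem.List.pyGetD C 0 0 + 1) (PySem.List.pyGetD C (-1) 0) 1 then ' ' else o)
  else o

def body2 (cols R C : List Int) (col : Int) (g : List (List Char)) : List (List Char) :=
  if col = 0 ∨ col = PySem.List.pyGetD cols (-1) 0 then
    (PySem.List.slice R (some 1) (some (-1))).foldl (fun g row => pvWr g row col '|') g
  else if col ∈ PySem.List.slice C (some 1) (some (-1)) then
    (PySem.List.pyRange (PySem.List.pyGetD R 0 0 + 1) (PySem.List.pyGetD R (-1) 0) 1).foldl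
      (fun g row => pvWr g row col ' ') g
  else g

def phi2 (cols R : List Int) (Cin : List Int) (r c : Int) (o : Char) : Char :=
  if c = 0 ∨ c = PySem.List.pyGetD cols (-1) 0 then
    (if r ∈ PySem.List.slice R (some 1) (some (-1)) then '|' else o)
  else if c ∈ Cin then
    (if r ∈ PySem.List.pyRange (PySem.List.pyGetD R 0 0 + 1) (PySem.List.pyGetD R (-1) 0) 1 then ' ' else o)
  else o

theorem length_body1 (rows C R : List Int) (x : Int) (g : List (List Char)) :
    (body1 rows C R x g).length = g.length := by
  unfold body1; split_ifs <;> first | exact length_wrRow _ _ _ _ | rfl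

theorem rowlen_body1 (rows C R : List Int) (x : Int) (g : List (List Char)) (i : Nat) :
    ((body1 rows C R x g).getD i []).length = (g.getD i []).length := by
  unfold body1; split_ifs <;> first | exact rowlen_wrRow _ _ _ _ i | rfl

theorem gget_body1 (rows C R : List Int) (x : Int) (g : List (List Char)) (r' c' : Nat)
    (hx0 : 0 ≤ x) (hCpos : ∀ y ∈ C, 0 ≤ y)
    (hr : r' < g.length) (hc : c' < (g.getD r' []).length) :
    gget (body1 rows C R x g) r' c'
      = if x = (r' : Int) then
          phi1 rows C (PySem.List.slice R (some 1) (some (-1))) x (c' : Int) (gget g r' c')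
        else gget g r' c' := by
  unfold body1 phi1
  split_ifs with b1 b2 <;>
    first
      | (rw [gget_wrRow _ _ _ _ _ _ hx0 (nonneg_slice_tail C hCpos) hr hc];
         by_cases hxr : x = (r' : Int) <;> simp_all)
      | (rw [gget_wrRow _ _ _ _ _ _ hx0 (nonneg_range C hCpos) hr hc];
         by_cases hxr : x = (r' : Int) <;> simp_all)
      | simp

theorem gget_fold1 (rows C R L : List Int) (g : List (List Char)) (r' c' : Nat)
    (hLpos : ∀ x ∈ L, 0 ≤ x) (hLnd : L.Nodup) (hCpos : ∀ x ∈ C, 0 ≤ x)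
    (hr : r' < g.length) (hc : c' < (g.getD r' []).length) :
    gget (L.foldl (fun g row => body1 rows C R row g) g) r' c'
      = if (r' : Int) ∈ L then
          phi1 rows C (PySem.List.slice R (some 1) (some (-1))) (r' : Int) (c' : Int) (gget g r' c')
        else gget g r' c' := by
  induction L generalizing g with
  | nil => simp
  | cons x L ih =>
    simp only [List.foldl_cons]
    obtain ⟨hxm, hnd⟩ := List.nodup_cons.mp hLnd
    have hx0 : 0 ≤ x := hLpos x List.mem_cons_self
    rw [ih (body1 rows C R x g) (fun a ha => hLpos a (List.mem_cons_of_mem _ ha)) hnd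
        (by rw [length_body1]; exact hr) (by rw [rowlen_body1]; exact hc),
      gget_body1 rows C R x g r' c' hx0 hCpos hr hc]
    by_cases h1 : (r' : Int) ∈ L <;> by_cases h2 : x = (r' : Int) <;> simp_all <;> omega

theorem length_body2 (cols R C : List Int) (x : Int) (g : List (List Char)) :
    (body2 cols R C x g).length = g.length := by
  unfold body2; split_ifs <;> first | exact length_wrCol _ _ _ _ | rfl

theorem rowlen_body2 (cols R C : List Int) (x : Int) (g : List (List Char)) (i : Nat) :
    ((body2 cols R C x g).getD i []).length = (g.getD i []).length := by
  unfold body2; split_ifs <;> first | exact rowlen_wrCol _ _ _ _ i | rfl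

theorem gget_body2 (cols R C : List Int) (x : Int) (g : List (List Char)) (r' c' : Nat)
    (hx0 : 0 ≤ x) (hRpos : ∀ y ∈ R, 0 ≤ y)
    (hr : r' < g.length) (hc : c' < (g.getD r' []).length) :
    gget (body2 cols R C x g) r' c'
      = if x = (c' : Int) then
          phi2 cols R (PySem.List.slice C (some 1) (some (-1))) (r' : Int) x (gget g r' c')
        else gget g r' c' := by
  unfold body2 phi2
  split_ifs with b1 b2 <;>
    first
      | (rw [gget_wrCol _ _ _ _ _ _ hx0 (nonneg_slice_tail R hRpos) hr hc];
         by_cases hxr : x = (c' : Int) <;> simp_all)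
      | (rw [gget_wrCol _ _ _ _ _ _ hx0 (nonneg_range R hRpos) hr hc];
         by_cases hxr : x = (c' : Int) <;> simp_all)
      | simp

theorem gget_fold2 (cols R C L : List Int) (g : List (List Char)) (r' c' : Nat)
    (hLpos : ∀ x ∈ L, 0 ≤ x) (hLnd : L.Nodup) (hRpos : ∀ x ∈ R, 0 ≤ x)
    (hr : r' < g.length) (hc : c' < (g.getD r' []).length) :
    gget (L.foldl (fun g col => body2 cols R C col g) g) r' c'
      = if (c' : Int) ∈ L then
          phi2 cols R (PySem.List.slice C (some 1) (some (-1))) (r' : Int) (c' : Int) (gget g r' c')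
        else gget g r' c' := by
  induction L generalizing g with
  | nil => simp
  | cons x L ih =>
    simp only [List.foldl_cons]
    obtain ⟨hxm, hnd⟩ := List.nodup_cons.mp hLnd
    have hx0 : 0 ≤ x := hLpos x List.mem_cons_self
    rw [ih (body2 cols R C x g) (fun a ha => hLpos a (List.mem_cons_of_mem _ ha)) hnd
        (by rw [length_body2]; exact hr) (by rw [rowlen_body2]; exact hc),
      gget_body2 cols R C x g r' c' hx0 hRpos hr hc]
    by_cases h1 : (c' : Int) ∈ L <;> by_cases h2 : x = (c' : Int) <;> simp_all <;> omega

theorem length_fold1 (rows C R L : List Int) (g : List (List Char)) :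
    (L.foldl (fun g row => body1 rows C R row g) g).length = g.length := by
  induction L generalizing g with
  | nil => rfl
  | cons x L ih => simp only [List.foldl_cons]; rw [ih, length_body1]

theorem rowlen_fold1 (rows C R L : List Int) (g : List (List Char)) (i : Nat) :
    ((L.foldl (fun g row => body1 rows C R row g) g).getD i []).length = (g.getD i []).length := by
  induction L generalizing g with
  | nil => rfl
  | cons x L ih => simp only [List.foldl_cons]; rw [ih, rowlen_body1]

theorem idx_pairwise {α : Type} (xs : List α) (P : α → Prop) [DecidablePred P] :
    (((PySem.List.enumerate xs 0).filterMap
        (fun p => if P p.2 then some p.1 else none)).Pairwise (· < ·)) := by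
  rw [List.pairwise_filterMap]
  refine (PySem.List.pairwise_lt_enumerate xs 0).imp ?_
  intro a b hab x hx y hy
  split at hx <;> split at hy <;> simp_all

theorem idx_nonneg {α : Type} (xs : List α) (P : α → Prop) [DecidablePred P] :
    ∀ x ∈ (PySem.List.enumerate xs 0).filterMap
        (fun p => if P p.2 then some p.1 else none), 0 ≤ x := by
  intro x hx
  rw [List.mem_filterMap] at hx
  obtain ⟨p, hp, hpx⟩ := hx
  rw [PySem.List.mem_enumerate_iff] at hp
  obtain ⟨k, hk, rfl⟩ := hp
  split at hpx <;> simp_all <;> omega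

theorem slice_sublist {α : Type} (xs : List α) (a? b? : Option Int) :
    (PySem.List.slice xs a? b?).Sublist xs := by
  unfold PySem.List.slice
  exact (List.take_sublist _ _).trans (List.drop_sublist _ _)

theorem slice_one_neg_one {α : Type} (xs : List α) :
    PySem.List.slice xs (some 1) (some (-1)) = xs.tail.dropLast := by
  unfold PySem.List.slice PySem.List.clampIdx
  rcases xs with _ | ⟨x, t⟩
  · simp
  · simp only [List.length_cons, List.tail_cons]
    rw [List.dropLast_eq_take]
    norm_num
    rw [if_neg (by omega : ¬ ((t.length : Int) < 0))]
    omega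

theorem mem_le_getLast (l : List Int) (hp : l.Pairwise (· < ·)) (h : l ≠ []) :
    ∀ x ∈ l, x ≤ l.getLast h := by
  intro x hx
  conv at hx => rw [← List.dropLast_append_getLast h]
  conv at hp => rw [← List.dropLast_append_getLast h]
  rw [List.pairwise_append] at hp
  rcases List.mem_append.mp hx with h1 | h1
  · exact le_of_lt (hp.2.2 x h1 _ (List.mem_singleton_self _))
  · rw [List.mem_singleton] at h1; omega

theorem mem_dropLast_lt (l : List Int) (hp : l.Pairwise (· < ·)) (h : l ≠ []) :
    ∀ x ∈ l.dropLast, x < l.getLast h := by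
  intro x hx
  conv at hp => rw [← List.dropLast_append_getLast h]
  rw [List.pairwise_append] at hp
  exact hp.2.2 x hx _ (List.mem_singleton_self _)

theorem mem_inner_strict (l : List Int) (hp : l.Pairwise (· < ·)) :
    ∀ x ∈ PySem.List.slice l (some 1) (some (-1)),
      PySem.List.pyGetD l 0 0 < x ∧ x < PySem.List.pyGetD l (-1) 0 := by
  intro x hx
  rw [slice_one_neg_one] at hx
  rcases l with _ | ⟨a, t⟩
  · simp at hx
  · simp only [List.tail_cons] at hx
    have ht : t ≠ [] := by rintro rfl; simp at hx
    have hne : (a :: t) ≠ [] := by simp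
    have hxt : x ∈ t := List.mem_of_mem_dropLast hx
    have h1 : a < x := (List.pairwise_cons.mp hp).1 x hxt
    have h2 : x < (a :: t).getLast hne := by
      apply mem_dropLast_lt _ hp hne
      rw [List.dropLast_cons_of_ne_nil ht]
      exact List.mem_cons_of_mem _ hx
    rw [PySem.List.pyGetD_zero_cons, PySem.List.pyGetD_neg_one (a :: t) 0 hne]
    exact ⟨h1, h2⟩

theorem inner_bounds (base S : List Int) (hbaseP : base.Pairwise (· < ·))
    (hbase0 : ∀ x ∈ base, 0 ≤ x) (hS : S.Sublist base) :
    ∀ x ∈ PySem.List.slice S (some 1) (some (-1)),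
      0 < x ∧ x < PySem.List.pyGetD base (-1) 0 := by
  intro x hx
  have hSP : S.Pairwise (· < ·) := hbaseP.sublist hS
  have hstrict := mem_inner_strict S hSP x hx
  have hxS : x ∈ S := PySem.List.mem_of_mem_slice S (some 1) (some (-1)) hx
  have hSne : S ≠ [] := by rintro rfl; simp at hxS
  -- S0 ≥ 0
  have hS0 : 0 ≤ PySem.List.pyGetD S 0 0 := by
    rcases S with _ | ⟨s0, t⟩
    · simp at hSne
    · rw [PySem.List.pyGetD_zero_cons]
      exact hbase0 s0 (List.Sublist.mem List.mem_cons_self hS)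
  -- Slast ≤ baseLast
  have hbne : base ≠ [] := by
    rintro rfl; rw [List.sublist_nil] at hS; exact hSne hS
  have hlast : PySem.List.pyGetD S (-1) 0 ≤ PySem.List.pyGetD base (-1) 0 := by
    rw [PySem.List.pyGetD_neg_one S 0 hSne, PySem.List.pyGetD_neg_one base 0 hbne]
    exact mem_le_getLast base hbaseP hbne _
      (List.Sublist.mem (List.getLast_mem hSne) hS)
  omega



-- effect of pass 1 alone, written as B's last two classifier branches

theorem inner_eq (rows C R : List Int) (r c : Int)
    (hr1 : r ∈ PySem.List.slice R (some 1) (some (-1)) → r ∈ R)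
    (hr2 : r ∈ PySem.List.slice R (some 1) (some (-1)) →
      ¬(r = 0 ∨ r = PySem.List.pyGetD rows (-1) 0)) (o : Char) :
    (if r ∈ R then phi1 rows C (PySem.List.slice R (some 1) (some (-1))) r c o else o)
    = (if r ∈ R ∧ (r = 0 ∨ r = PySem.List.pyGetD rows (-1) 0)
          ∧ c ∈ PySem.List.slice C (some 1) (some (-1)) then '-'
       else if r ∈ PySem.List.slice R (some 1) (some (-1))
          ∧ (PySem.List.pyGetD C 0 0 < c ∧ c < PySem.List.pyGetD C (-1) 0) then ' '
       else o) := by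
  unfold phi1
  simp only [PySem.List.mem_pyRange_one]
  by_cases hrR : r ∈ R
  · by_cases hrB : r = 0 ∨ r = PySem.List.pyGetD rows (-1) 0
    · by_cases hcCin : c ∈ PySem.List.slice C (some 1) (some (-1))
      · have hpos : r ∈ R ∧ (r = 0 ∨ r = PySem.List.pyGetD rows (-1) 0)
            ∧ c ∈ PySem.List.slice C (some 1) (some (-1)) := ⟨hrR, hrB, hcCin⟩
        simp only [if_pos hrR, if_pos hrB, if_pos hcCin, if_pos hpos]
      · have h3 : ¬(r ∈ R ∧ (r = 0 ∨ r = PySem.List.pyGetD rows (-1) 0)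
            ∧ c ∈ PySem.List.slice C (some 1) (some (-1))) := fun h => hcCin h.2.2
        have h4 : ¬(r ∈ PySem.List.slice R (some 1) (some (-1))
            ∧ (PySem.List.pyGetD C 0 0 < c ∧ c < PySem.List.pyGetD C (-1) 0)) :=
          fun h => (hr2 h.1) hrB
        simp only [if_pos hrR, if_pos hrB, if_neg hcCin, if_neg h3, if_neg h4]
    · have h3 : ¬(r ∈ R ∧ (r = 0 ∨ r = PySem.List.pyGetD rows (-1) 0)
          ∧ c ∈ PySem.List.slice C (some 1) (some (-1))) := fun h => hrB h.2.1
      by_cases hrRin : r ∈ PySem.List.slice R (some 1) (some (-1))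
      · by_cases hcMid : PySem.List.pyGetD C 0 0 + 1 ≤ c ∧ c < PySem.List.pyGetD C (-1) 0
        · have h4 : r ∈ PySem.List.slice R (some 1) (some (-1))
              ∧ (PySem.List.pyGetD C 0 0 < c ∧ c < PySem.List.pyGetD C (-1) 0) :=
            ⟨hrRin, by omega⟩
          simp only [if_pos hrR, if_neg hrB, if_pos hrRin, if_pos hcMid, if_neg h3, if_pos h4]
        · have h4 : ¬(r ∈ PySem.List.slice R (some 1) (some (-1))
              ∧ (PySem.List.pyGetD C 0 0 < c ∧ c < PySem.List.pyGetD C (-1) 0)) :=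
            fun h => hcMid ⟨by omega, h.2.2⟩
          simp only [if_pos hrR, if_neg hrB, if_pos hrRin, if_neg hcMid, if_neg h3, if_neg h4]
      · have h4 : ¬(r ∈ PySem.List.slice R (some 1) (some (-1))
            ∧ (PySem.List.pyGetD C 0 0 < c ∧ c < PySem.List.pyGetD C (-1) 0)) :=
          fun h => hrRin h.1
        simp only [if_pos hrR, if_neg hrB, if_neg hrRin, if_neg h3, if_neg h4]
  · have h3 : ¬(r ∈ R ∧ (r = 0 ∨ r = PySem.List.pyGetD rows (-1) 0)
        ∧ c ∈ PySem.List.slice C (some 1) (some (-1))) := fun h => hrR h.1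
    have h4 : ¬(r ∈ PySem.List.slice R (some 1) (some (-1))
        ∧ (PySem.List.pyGetD C 0 0 < c ∧ c < PySem.List.pyGetD C (-1) 0)) :=
      fun h => hrR (hr1 h.1)
    simp only [if_neg hrR, if_neg h3, if_neg h4]

theorem classify_eq (rows cols R C : List Int)
    (hrowsP : rows.Pairwise (· < ·)) (hcolsP : cols.Pairwise (· < ·))
    (hrows0 : ∀ x ∈ rows, 0 ≤ x) (hcols0 : ∀ x ∈ cols, 0 ≤ x)
    (hR : R.Sublist rows) (hC : C.Sublist cols) (r c : Int) (o : Char) :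
    (if c ∈ C then
       phi2 cols R (PySem.List.slice C (some 1) (some (-1))) r c
         (if r ∈ R then phi1 rows C (PySem.List.slice R (some 1) (some (-1))) r c o else o)
     else (if r ∈ R then phi1 rows C (PySem.List.slice R (some 1) (some (-1))) r c o else o))
    = pvClassify rows cols R C (PySem.Set.ofList R) (PySem.Set.ofList C)
        (PySem.Set.ofList (PySem.List.slice R (some 1) (some (-1))))
        (PySem.Set.ofList (PySem.List.slice C (some 1) (some (-1)))) r c o := by
  have hRP : R.Pairwise (· < ·) := hrowsP.sublist hR
  have hCP : C.Pairwise (· < ·) := hcolsP.sublist hC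
  have hr1 : r ∈ PySem.List.slice R (some 1) (some (-1)) → r ∈ R :=
    PySem.List.mem_of_mem_slice R _ _
  have hc1 : c ∈ PySem.List.slice C (some 1) (some (-1)) → c ∈ C :=
    PySem.List.mem_of_mem_slice C _ _
  have hr2 : r ∈ PySem.List.slice R (some 1) (some (-1)) →
      ¬(r = 0 ∨ r = PySem.List.pyGetD rows (-1) 0) := by
    intro h; have := inner_bounds rows R hrowsP hrows0 hR r h; omega
  have hc2 : c ∈ PySem.List.slice C (some 1) (some (-1)) →
      ¬(c = 0 ∨ c = PySem.List.pyGetD cols (-1) 0) := by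
    intro h; have := inner_bounds cols C hcolsP hcols0 hC c h; omega
  have hinner := inner_eq rows C R r c hr1 hr2 o
  unfold phi2 pvClassify
  simp only [PySem.Set.mem_ofList, PySem.List.mem_pyRange_one]
  by_cases hcC : c ∈ C
  · by_cases hcB : c = 0 ∨ c = PySem.List.pyGetD cols (-1) 0
    · by_cases hrRin : r ∈ PySem.List.slice R (some 1) (some (-1))
      · have hpos : c ∈ C ∧ (c = 0 ∨ c = PySem.List.pyGetD cols (-1) 0)
            ∧ r ∈ PySem.List.slice R (some 1) (some (-1)) := ⟨hcC, hcB, hrRin⟩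
        simp only [if_pos hcC, if_pos hcB, if_pos hrRin, if_pos hpos]
      · have h1 : ¬(c ∈ C ∧ (c = 0 ∨ c = PySem.List.pyGetD cols (-1) 0)
            ∧ r ∈ PySem.List.slice R (some 1) (some (-1))) := fun h => hrRin h.2.2
        have h2 : ¬(c ∈ PySem.List.slice C (some 1) (some (-1))
            ∧ (PySem.List.pyGetD R 0 0 < r ∧ r < PySem.List.pyGetD R (-1) 0)) :=
          fun h => (hc2 h.1) hcB
        simp only [if_pos hcC, if_pos hcB, if_neg hrRin, if_neg h1, if_neg h2]
        exact hinner
    · have h1 : ¬(c ∈ C ∧ (c = 0 ∨ c = PySem.List.pyGetD cols (-1) 0)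
          ∧ r ∈ PySem.List.slice R (some 1) (some (-1))) := fun h => hcB h.2.1
      by_cases hcCin : c ∈ PySem.List.slice C (some 1) (some (-1))
      · by_cases hrMid : PySem.List.pyGetD R 0 0 + 1 ≤ r ∧ r < PySem.List.pyGetD R (-1) 0
        · have h2 : c ∈ PySem.List.slice C (some 1) (some (-1))
              ∧ (PySem.List.pyGetD R 0 0 < r ∧ r < PySem.List.pyGetD R (-1) 0) :=
            ⟨hcCin, by omega⟩
          simp only [if_pos hcC, if_neg hcB, if_pos hcCin, if_pos hrMid, if_neg h1, if_pos h2]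
        · have h2 : ¬(c ∈ PySem.List.slice C (some 1) (some (-1))
              ∧ (PySem.List.pyGetD R 0 0 < r ∧ r < PySem.List.pyGetD R (-1) 0)) :=
            fun h => hrMid ⟨by omega, h.2.2⟩
          simp only [if_pos hcC, if_neg hcB, if_pos hcCin, if_neg hrMid, if_neg h1, if_neg h2]
          exact hinner
      · have h2 : ¬(c ∈ PySem.List.slice C (some 1) (some (-1))
            ∧ (PySem.List.pyGetD R 0 0 < r ∧ r < PySem.List.pyGetD R (-1) 0)) :=
          fun h => hcCin h.1
        simp only [if_pos hcC, if_neg hcB, if_neg hcCin, if_neg h1, if_neg h2]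
        exact hinner
  · have h1 : ¬(c ∈ C ∧ (c = 0 ∨ c = PySem.List.pyGetD cols (-1) 0)
        ∧ r ∈ PySem.List.slice R (some 1) (some (-1))) := fun h => hcC h.1
    have h2 : ¬(c ∈ PySem.List.slice C (some 1) (some (-1))
        ∧ (PySem.List.pyGetD R 0 0 < r ∧ r < PySem.List.pyGetD R (-1) 0)) :=
      fun h => hcC (hc1 h.1)
    simp only [if_neg hcC, if_neg h1, if_neg h2]
    exact hinner

theorem enumerate_map {α β : Type} (f : α → β) (l : List α) (s : Int) :
    PySem.List.enumerate (l.map f) s = (PySem.List.enumerate l s).map (fun p => (p.1, f p.2)) := by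
  induction l generalizing s with
  | nil => rfl
  | cons x t ih => simp [PySem.List.enumerate_cons, ih]

theorem colsAB (table : List String) :
    pvColsA ((table.map (fun s => s.toList)).headD []) = pvColsB table := by
  cases table <;> rfl

theorem rowsAB (table : List String) :
    pvRowsA (table.map (fun s => s.toList)) = pvRowsB table := by
  unfold pvRowsA pvRowsB
  rw [enumerate_map, List.filterMap_map]
  rfl

theorem length_fold2 (cols R C L : List Int) (g : List (List Char)) :
    (L.foldl (fun g col => body2 cols R C col g) g).length = g.length := by
  induction L generalizing g with
  | nil => rfl
  | cons x L ih => simp only [List.foldl_cons]; rw [ih, length_body2]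

theorem rowlen_fold2 (cols R C L : List Int) (g : List (List Char)) (i : Nat) :
    ((L.foldl (fun g col => body2 cols R C col g) g).getD i []).length = (g.getD i []).length := by
  induction L generalizing g with
  | nil => rfl
  | cons x L ih => simp only [List.foldl_cons]; rw [ih, rowlen_body2]

theorem rowsB_pairwise (table : List String) : (pvRowsB table).Pairwise (· < ·) :=
  idx_pairwise table (fun s => s.toList.headD ' ' = '+')
theorem rowsB_nonneg (table : List String) : ∀ x ∈ pvRowsB table, 0 ≤ x :=
  idx_nonneg table (fun s => s.toList.headD ' ' = '+')
theorem colsB_pairwise (table : List String) : (pvColsB table).Pairwise (· < ·) :=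
  idx_pairwise (table.headD "").toList (fun v => v = '+')
theorem colsB_nonneg (table : List String) : ∀ x ∈ pvColsB table, 0 ≤ x :=
  idx_nonneg (table.headD "").toList (fun v => v = '+')

theorem getD_eq_getElem' (g : List (List Char)) (i : Nat) (hi : i < g.length) :
    g.getD i [] = g[i]'hi := by
  rw [List.getD_eq_getElem?_getD, List.getElem?_eq_getElem hi]; rfl

theorem gget_eq_getElem (g : List (List Char)) (i j : Nat) (hi : i < g.length)
    (hj : j < (g[i]'hi).length) : gget g i j = (g[i]'hi)[j]'hj := by
  unfold gget
  rw [getD_eq_getElem' g i hi, List.getD_eq_getElem?_getD, List.getElem?_eq_getElem hj]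
  rfl

theorem cellsJoining_main (table : List String) (maxRow minCol minRow maxCol : Int) :
    cellsJoining table ((maxRow, minCol), (minRow, maxCol))
      = cellsJoining_alt table ((maxRow, minCol), (minRow, maxCol)) := by
  unfold cellsJoining cellsJoining_alt
  simp only [colsAB, rowsAB]
  set rows := pvRowsB table with hrows
  set cols := pvColsB table with hcols
  set g := table.map (fun s => s.toList) with hg
  set R := PySem.List.slice rows (some minRow) (some (maxRow + 2)) with hR
  set C := PySem.List.slice cols (some minCol) (some (maxCol + 2)) with hC
  have hP1 : ∀ g' : List (List Char), pvPass1 rows C R g'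
      = R.foldl (fun g row => body1 rows C R row g) g' := fun _ => rfl
  have hP2 : ∀ g' : List (List Char), pvPass2 cols R C g'
      = C.foldl (fun g col => body2 cols R C col g) g' := fun _ => rfl
  have hrowsP := rowsB_pairwise table
  have hcolsP := colsB_pairwise table
  have hrows0 := rowsB_nonneg table
  have hcols0 := colsB_nonneg table
  have hRsub : R.Sublist rows := slice_sublist rows _ _
  have hCsub : C.Sublist cols := slice_sublist cols _ _
  have hRpos : ∀ x ∈ R, 0 ≤ x := fun x hx => hrows0 x (List.Sublist.mem hx hRsub)
  have hCpos : ∀ x ∈ C, 0 ≤ x := fun x hx => hcols0 x (List.Sublist.mem hx hCsub)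
  have hRnd : R.Nodup := (hrowsP.sublist hRsub).imp (fun h => ne_of_lt h)
  have hCnd : C.Nodup := (hcolsP.sublist hCsub).imp (fun h => ne_of_lt h)
  have hglen : g.length = table.length := by rw [hg, List.length_map]
  have hlenP2 : (pvPass2 cols R C (pvPass1 rows C R g)).length = table.length := by
    rw [hP2, length_fold2, hP1, length_fold1, hglen]
  apply List.ext_getElem
  · simp [hlenP2, PySem.List.length_enumerate]
  · intro i h1 h2
    have hi : i < table.length := by
      rw [List.length_map, hlenP2] at h1; exact h1
    have hig : i < g.length := by omega
    have hrowg : g[i]'hig = table[i].toList := by simp [hg]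
    have hrl : ((pvPass2 cols R C (pvPass1 rows C R g)).getD i []).length
        = table[i].toList.length := by
      rw [hP2, rowlen_fold2, hP1, rowlen_fold1, getD_eq_getElem' g i hig, hrowg]
    rw [List.getElem_map, List.getElem_map, PySem.List.getElem_enumerate]
    simp only [zero_add]
    apply congrArg String.ofList
    apply List.ext_getElem
    · have : i < (pvPass2 cols R C (pvPass1 rows C R g)).length := by omega
      rw [← getD_eq_getElem' _ i this, hrl]
      simp [PySem.List.length_enumerate]
    · intro j hj1 hj2
      have hjlen : j < ((pvPass2 cols R C (pvPass1 rows C R g)).getD i []).length := by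
        rw [hrl]
        rw [← getD_eq_getElem' _ i (by omega : i < (pvPass2 cols R C (pvPass1 rows C R g)).length), hrl] at hj1
        omega
      have hiP2 : i < (pvPass2 cols R C (pvPass1 rows C R g)).length := by omega
      -- left side as gget
      have hL : (pvPass2 cols R C (pvPass1 rows C R g))[i][j]
          = gget (pvPass2 cols R C (pvPass1 rows C R g)) i j := by
        rw [gget_eq_getElem _ i j hiP2 (by rw [← getD_eq_getElem' _ i hiP2]; exact hjlen)]
      rw [hL]
      have hiP1 : i < (pvPass1 rows C R g).length := by rw [hP1, length_fold1]; omega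
      have hjP1 : j < ((pvPass1 rows C R g).getD i []).length := by
        rw [hP1, rowlen_fold1, getD_eq_getElem' g i hig, hrowg]
        rw [hrl] at hjlen; omega
      have hjg : j < (g.getD i []).length := by
        rw [getD_eq_getElem' g i hig, hrowg]; rw [hrl] at hjlen; omega
      rw [hP2, gget_fold2 cols R C C _ i j hCpos hCnd hRpos hiP1 hjP1]
      have hInner : gget (pvPass1 rows C R g) i j
          = if (i : Int) ∈ R then
              phi1 rows C (PySem.List.slice R (some 1) (some (-1))) (i : Int) (j : Int)
                (gget g i j)
            else gget g i j := by
        rw [hP1, gget_fold1 rows C R R g i j hRpos hRnd hCpos hig hjg]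
      rw [hInner]
      have hcls := classify_eq rows cols R C hrowsP hcolsP hrows0 hcols0 hRsub hCsub
        (i : Int) (j : Int) (gget g i j)
      rw [hcls]
      -- right side
      have hjrow : j < table[i].toList.length := by rw [hrl] at hjlen; omega
      rw [List.getElem_map, PySem.List.getElem_enumerate]
      simp only [zero_add]
      congr 1
      rw [gget_eq_getElem g i j hig (by rw [hrowg]; exact hjrow)]
      simp [hrowg]

-- ===== VERDICT (by name: the statement is the Claim_ definition above) =====
theorem cellsJoining_spec : Claim_equal_cellsJoining := by
  unfold Claim_equal_cellsJoining Spec_cellsJoining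
  rintro table ⟨⟨maxRow, minCol⟩, ⟨minRow, maxCol⟩⟩ _hdom _hpre
  exact cellsJoining_main table maxRow minCol minRow maxCol
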